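-- pv_equiv track=rewrite | github.com/MuggleOne/simple-demo | Closure.py | removeRepetition
-- ===== SOURCE A (Python) =====
-- def removeRepetition(x_result):
--     """考虑到算法处理可能会出现结果中有重复属性符号的情况（猜测），如‘ABCCDE’，该方法将去除其中（可能存在的）重复符号"""
--     x_set = set(x_result)
--     x_pureList = []
--     for i in x_set:
--         x_pureList.append(i)
--     x_pureList.sort()
--
--     x_pureResult = ""
--     for item in x_pureList:
--         x_pureResult += item
--
--     return x_pureResult
-- ===== SOURCE B (Python) =====
-- def removeRepetition(x_result):
--     """Sort all characters first, then remove duplicates in one pass by comparing with the previously kept character."""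
--     chars = sorted(x_result)
--     out = []
--     last = None
--     for c in chars:
--         if c != last:
--             out.append(c)
--             last = c
--     return "".join(out)
-- ===== Notes on version B (the rewrite author's own statement) =====
-- stated objective: alternative
-- what changed: B eliminates the hash set entirely: it sorts the raw character list first and removes duplicates in a single post-sort pass via adjacent comparison with the last kept character, instead of deduplicating through a set before sorting.
import Mathlib
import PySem

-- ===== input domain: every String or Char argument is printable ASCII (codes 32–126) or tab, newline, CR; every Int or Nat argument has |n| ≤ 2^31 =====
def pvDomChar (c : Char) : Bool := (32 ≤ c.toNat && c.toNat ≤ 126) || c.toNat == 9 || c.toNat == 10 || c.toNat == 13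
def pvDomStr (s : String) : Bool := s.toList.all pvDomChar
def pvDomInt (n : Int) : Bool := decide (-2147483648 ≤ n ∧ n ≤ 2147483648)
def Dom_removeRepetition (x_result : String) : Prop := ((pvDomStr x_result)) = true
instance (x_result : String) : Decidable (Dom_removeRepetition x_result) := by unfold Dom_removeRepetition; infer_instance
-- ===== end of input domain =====

-- B replaces A's hash set by a sort of the raw character list followed by one
-- adjacent-comparison dedup pass (alternative decomposition, same cost class).

-- ===== PORT A =====
def removeRepetition (x_result : String) : String :=
  let x_set : PySem.Set Char := PySem.Set.ofList x_result.toList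
  let x_pureList : List Char := x_set.foldl (fun l i => l ++ [i]) []
  let x_sorted := PySem.List.sorted x_pureList (fun x => x) false
  String.ofList (x_sorted.foldl (fun acc item => acc ++ [item]) [])

-- ===== PORT B =====
def removeRepetition_alt (x_result : String) : String :=
  let chars := PySem.List.sorted x_result.toList (fun x => x) false
  let st := chars.foldl
    (fun (s : List Char × Option Char) c =>
      if some c = s.2 then s else (s.1 ++ [c], some c)) ([], none)
  String.ofList st.1

-- ===== PRECONDITION & SPEC =====
def Spec_removeRepetition (x_result : String) (out : String) : Prop := out = removeRepetition_alt x_result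
instance (x_result : String) (out : String) : Decidable (Spec_removeRepetition x_result out) := by unfold Spec_removeRepetition; infer_instance

-- ===== CLAIM (what is proved, stated in full; the proofs are below) =====
def Claim_equal_removeRepetition : Prop := ∀ (x_result : String), Dom_removeRepetition x_result → Spec_removeRepetition x_result (removeRepetition x_result)

-- ===== LEMMAS AND PROOFS =====

-- the list produced by B's fold, as a structural recursion
def dedupAdj : List Char → Option Char → List Char
  | [], _ => []
  | c :: rest, last => if some c = last then dedupAdj rest last else c :: dedupAdj rest (some c)

def finalLast : List Char → Option Char → Option Char
  | [], last => last
  | c :: rest, last => if some c = last then finalLast rest last else finalLast rest (some c)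

theorem foldl_dedup (l : List Char) (acc : List Char) (last : Option Char) :
    l.foldl (fun (s : List Char × Option Char) c =>
      if some c = s.2 then s else (s.1 ++ [c], some c)) (acc, last)
      = (acc ++ dedupAdj l last, finalLast l last) := by
  induction l generalizing acc last with
  | nil => simp [dedupAdj, finalLast]
  | cons c rest ih =>
    simp only [List.foldl_cons, dedupAdj, finalLast]
    by_cases h : some c = last
    · simp [h, ih]
    · simp [h, ih, List.append_assoc]

theorem foldl_append_id (l acc : List Char) :
    l.foldl (fun a x => a ++ [x]) acc = acc ++ l := by
  induction l generalizing acc with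
  | nil => simp
  | cons c rest ih => simp [ih]

theorem mem_dedupAdj (l : List Char) (last : Option Char)
    (hs : l.Pairwise (· ≤ ·))
    (hlast : ∀ a, last = some a → ∀ x ∈ l, a ≤ x) :
    ∀ x, x ∈ dedupAdj l last ↔ x ∈ l ∧ some x ≠ last := by
  induction l generalizing last with
  | nil => simp [dedupAdj]
  | cons c rest ih =>
    have hs' := (List.pairwise_cons.mp hs).2
    have hc := (List.pairwise_cons.mp hs).1
    intro x
    simp only [dedupAdj]
    by_cases h : some c = last
    · rw [if_pos h]
      have := ih last hs' (fun a ha y hy => hlast a ha y (List.mem_cons_of_mem _ hy)) x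
      rw [this]
      constructor
      · rintro ⟨hx, hne⟩; exact ⟨List.mem_cons_of_mem _ hx, hne⟩
      · rintro ⟨hx, hne⟩
        rcases List.mem_cons.mp hx with rfl | hx
        · exact absurd h hne
        · exact ⟨hx, hne⟩
    · rw [if_neg h]
      have := ih (some c) hs' (fun a ha y hy => by cases ha; exact hc y hy) x
      simp only [List.mem_cons, this]
      constructor
      · rintro (rfl | ⟨hx, hne⟩)
        · exact ⟨Or.inl rfl, h⟩
        · refine ⟨Or.inr hx, ?_⟩
          intro hxl
          rcases last with _ | a
          · exact absurd hxl (by simp)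
          · have h1 := hlast a rfl x (List.mem_cons_of_mem _ hx)
            have h2 := hlast a rfl c (List.mem_cons_self ..)
            have hx' : x = a := Option.some.inj hxl
            have hcx : c ≤ x := hc x hx
            apply h
            have : c = a := le_antisymm (hx' ▸ hcx) h2
            simp [this]
      · rintro ⟨rfl | hx, hne⟩
        · exact Or.inl rfl
        · by_cases hxc : x = c
          · exact Or.inl hxc
          · exact Or.inr ⟨hx, by simpa using hxc⟩

theorem pairwise_dedupAdj (l : List Char) (last : Option Char)
    (hs : l.Pairwise (· ≤ ·)) :
    (dedupAdj l last).Pairwise (· < ·) := by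
  induction l generalizing last with
  | nil => simp [dedupAdj]
  | cons c rest ih =>
    have hs' := (List.pairwise_cons.mp hs).2
    have hc := (List.pairwise_cons.mp hs).1
    simp only [dedupAdj]
    by_cases h : some c = last
    · rw [if_pos h]; exact ih last hs'
    · rw [if_neg h]
      refine List.pairwise_cons.mpr ⟨?_, ih (some c) hs'⟩
      intro y hy
      have hmem := (mem_dedupAdj rest (some c) hs'
        (fun a ha z hz => by cases ha; exact hc z hz) y).mp hy
      exact lt_of_le_of_ne (hc y hmem.1) (by
        intro hcy; exact hmem.2 (by simp [hcy]))

theorem nodup_dedupAdj (l : List Char) (last : Option Char)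
    (hs : l.Pairwise (· ≤ ·)) : (dedupAdj l last).Nodup :=
  (pairwise_dedupAdj l last hs).imp ne_of_lt

theorem dedup_sorted_eq (cl : List Char) :
    PySem.List.sorted (PySem.Set.ofList cl) (fun x => x) false
      = dedupAdj (PySem.List.sorted cl (fun x => x) false) none := by
  set s := PySem.List.sorted cl (fun x => x) false with hsdef
  have hs : s.Pairwise (· ≤ ·) := PySem.List.sorted_pairwise cl (fun x => x)
  have hnone : ∀ a : Char, (none : Option Char) = some a → ∀ x ∈ s, a ≤ x := by
    intro a ha; cases ha
  apply PySem.List.sorted_eq_of_perm_of_pairwise_lt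
  · -- dedupAdj s none ~ Set.ofList cl
    rw [List.perm_ext_iff_of_nodup (nodup_dedupAdj s none hs) (PySem.Set.nodup_ofList cl)]
    intro x
    rw [mem_dedupAdj s none hs hnone x, PySem.Set.mem_ofList]
    simp [hsdef, PySem.List.mem_sorted]
  · exact pairwise_dedupAdj s none hs

-- ===== VERDICT (by name: the statement is the Claim_ definition above) =====
theorem removeRepetition_spec : Claim_equal_removeRepetition := by
  intro x_result _
  unfold Spec_removeRepetition removeRepetition removeRepetition_alt
  simp only [foldl_dedup, foldl_append_id, List.nil_append]
  rw [dedup_sorted_eq]
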